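-- pv_equiv track=rewrite | github.com/jfuruness/mrt_collector | lib_mrt_collector/mrt_file.py | _get_path_data
-- ===== SOURCE A (Python) =====
-- def _get_path_data(as_path, non_public_asns, max_asn, ixps):
--     """Returns as path data"""
--
--     # NOTE: make sure this matches the header!!
--     prepending = False
--     loop = False
--     ixp = False
--
--     as_path_set = set()
--     last_asn = None
--     last_non_ixp = None
--     for asn in as_path:
--         if last_asn == asn:
--             prepending = True
--             loop = True
--         if asn in as_path_set:
--             loop = True
--         as_path_set.add(asn)
--         last_asn = asn
--         if asn in ixps:
--             ixp = True
--         else: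
--             last_non_ixp = asn
--
--     # doesn't follow Gao rexford according to Caida
--     # Contains ASNs that Caida doesn't have (that aren't non public)
--     # path poisoning by reserved asn, non public asn, or clique being split
--     return (int(prepending), int(loop), int(ixp), int(False), int(False), int(False),)
-- ===== SOURCE B (Python) =====
-- def _get_path_data(as_path, non_public_asns, max_asn, ixps):
--     """Returns as path data"""
--     # B: compute the three flags independently instead of in one stateful loop;
--     # the dead last_non_ixp/last_asn bookkeeping is dropped.
--     prepending = any(a == b for a, b in zip(as_path, as_path[1:]))
--     loop = prepending or len(set(as_path)) != len(as_path)
--     ixp = not set(as_path).isdisjoint(ixps)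
--     return (int(prepending), int(loop), int(ixp), 0, 0, 0)
-- ===== Notes on version B (the rewrite author's own statement) =====
-- stated objective: simpler
-- what changed: Replaces the single stateful loop carrying six variables (prepending/loop/ixp/seen-set/last_asn/dead last_non_ixp) by three independent one-line flag computations: consecutive-pair scan for prepending, a set-cardinality check for loop, and a set-disjointness test for ixp.
import Mathlib
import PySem

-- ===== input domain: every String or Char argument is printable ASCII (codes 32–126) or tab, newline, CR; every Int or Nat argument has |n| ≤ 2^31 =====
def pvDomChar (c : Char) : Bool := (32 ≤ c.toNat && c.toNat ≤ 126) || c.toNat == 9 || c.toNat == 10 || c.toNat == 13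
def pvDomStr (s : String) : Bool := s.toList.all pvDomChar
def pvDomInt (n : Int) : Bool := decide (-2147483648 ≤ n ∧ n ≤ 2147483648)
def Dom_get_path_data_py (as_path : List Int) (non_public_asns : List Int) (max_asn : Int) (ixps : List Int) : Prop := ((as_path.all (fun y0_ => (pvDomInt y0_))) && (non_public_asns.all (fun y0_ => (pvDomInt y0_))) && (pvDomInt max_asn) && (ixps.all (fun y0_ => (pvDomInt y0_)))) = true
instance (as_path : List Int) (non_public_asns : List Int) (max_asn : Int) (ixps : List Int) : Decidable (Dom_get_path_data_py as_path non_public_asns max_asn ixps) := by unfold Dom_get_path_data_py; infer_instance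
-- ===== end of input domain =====

-- B computes the three flags independently (pair scan / set-cardinality / disjointness)
-- instead of A's single stateful loop; objective: simpler.

-- ===== PORT A =====
-- one iteration of A's for-loop; state = (prepending, loop, ixp, as_path_set, last_asn, last_non_ixp)
def pvStepA (ixps : List Int)
    (st : Bool × Bool × Bool × PySem.Set Int × Option Int × Option Int) (asn : Int) :
    Bool × Bool × Bool × PySem.Set Int × Option Int × Option Int :=
  let prepending := st.1
  let loop := st.2.1
  let ixp := st.2.2.1
  let s := st.2.2.2.1
  let last_asn := st.2.2.2.2.1
  let last_non_ixp := st.2.2.2.2.2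
  let prepending := if last_asn = some asn then true else prepending
  let loop := if last_asn = some asn then true else loop
  let loop := if PySem.Set.contains s asn then true else loop
  let s := PySem.Set.add s asn
  let last_asn := some asn
  let ixp := if decide (asn ∈ ixps) then true else ixp
  let last_non_ixp := if decide (asn ∈ ixps) then last_non_ixp else some asn
  (prepending, loop, ixp, s, last_asn, last_non_ixp)

def get_path_data_py (as_path : List Int) (non_public_asns : List Int) (max_asn : Int) (ixps : List Int) : Int × Int × Int × Int × Int × Int :=
  let st := as_path.foldl (pvStepA ixps) (false, false, false, PySem.Set.empty, none, none)
  ((if st.1 then 1 else 0), (if st.2.1 then 1 else 0), (if st.2.2.1 then 1 else 0), 0, 0, 0)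

-- ===== PORT B =====
def get_path_data_py_alt (as_path : List Int) (non_public_asns : List Int) (max_asn : Int) (ixps : List Int) : Int × Int × Int × Int × Int × Int :=
  -- as_path[1:] on a list is exactly List.drop 1
  let prepending := (as_path.zip (as_path.drop 1)).any (fun p => p.1 == p.2)
  let loop := prepending || !((PySem.Set.ofList as_path).length == as_path.length)
  let ixp := !(PySem.Set.isdisjoint (PySem.Set.ofList as_path) ixps)
  ((if prepending then 1 else 0), (if loop then 1 else 0), (if ixp then 1 else 0), 0, 0, 0)

-- ===== PRECONDITION & SPEC =====
def Spec_get_path_data_py (as_path : List Int) (non_public_asns : List Int) (max_asn : Int) (ixps : List Int) (out : Int × Int × Int × Int × Int × Int) : Prop := out = get_path_data_py_alt as_path non_public_asns max_asn ixps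
instance (as_path : List Int) (non_public_asns : List Int) (max_asn : Int) (ixps : List Int) (out : Int × Int × Int × Int × Int × Int) : Decidable (Spec_get_path_data_py as_path non_public_asns max_asn ixps out) := by unfold Spec_get_path_data_py; infer_instance

-- ===== CLAIM (what is proved, stated in full; the proofs are below) =====
def Claim_equal_get_path_data_py : Prop := ∀ (as_path : List Int) (non_public_asns : List Int) (max_asn : Int) (ixps : List Int), Dom_get_path_data_py as_path non_public_asns max_asn ixps → Spec_get_path_data_py as_path non_public_asns max_asn ixps (get_path_data_py as_path non_public_asns max_asn ixps)

-- ===== LEMMAS AND PROOFS =====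

-- characterisation helpers for A's fold
def pvPre : Option Int → List Int → Bool
  | _, [] => false
  | last, a :: r => (decide (last = some a)) || pvPre (some a) r

def pvDup : PySem.Set Int → List Int → Bool
  | _, [] => false
  | s, a :: r => PySem.Set.contains s a || pvDup (PySem.Set.add s a) r

theorem pvStepA_eq (ixps : List Int) (p lo ix : Bool) (s : PySem.Set Int)
    (last lnip : Option Int) (a : Int) :
    pvStepA ixps (p, lo, ix, s, last, lnip) a =
      ((if last = some a then true else p),
       (if PySem.Set.contains s a then true else if last = some a then true else lo),
       (if decide (a ∈ ixps) then true else ix),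
       PySem.Set.add s a, some a,
       (if decide (a ∈ ixps) then lnip else some a)) := rfl

theorem pvFold_flags (ixps : List Int) :
    ∀ (l : List Int) (p lo ix : Bool) (s : PySem.Set Int) (last lnip : Option Int),
    (∀ a, last = some a → PySem.Set.contains s a = true) →
    (l.foldl (pvStepA ixps) (p, lo, ix, s, last, lnip)).1 = (p || pvPre last l) ∧
    (l.foldl (pvStepA ixps) (p, lo, ix, s, last, lnip)).2.1 = (lo || pvDup s l) ∧
    (l.foldl (pvStepA ixps) (p, lo, ix, s, last, lnip)).2.2.1
      = (ix || l.any (fun a => decide (a ∈ ixps))) := by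
  intro l
  induction l with
  | nil => intro p lo ix s last lnip _; simp [pvPre, pvDup]
  | cons a r ih =>
    intro p lo ix s last lnip hinv
    have hinv' : ∀ b, (some a : Option Int) = some b →
        PySem.Set.contains (PySem.Set.add s a) b = true := by
      intro b hb
      cases hb
      simp [PySem.Set.contains_iff, PySem.Set.mem_add]
    have := ih (if last = some a then true else p)
      (if PySem.Set.contains s a then true else if last = some a then true else lo)
      (if decide (a ∈ ixps) then true else ix)
      (PySem.Set.add s a) (some a)
      (if decide (a ∈ ixps) then lnip else some a) hinv'
    obtain ⟨h1, h2, h3⟩ := this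
    refine ⟨?_, ?_, ?_⟩
    · rw [List.foldl_cons, pvStepA_eq, h1]
      by_cases h : last = some a <;> simp [pvPre, h]
    · rw [List.foldl_cons, pvStepA_eq, h2]
      by_cases hc : PySem.Set.contains s a = true
      · have hm : a ∈ s := (PySem.Set.contains_iff s a).mp hc
        simp [pvDup, hm, PySem.Set.contains_iff]
      · have hla : last ≠ some a := by
          intro h; exact hc (hinv a h)
        have hm : a ∉ s := fun hmem => hc ((PySem.Set.contains_iff s a).mpr hmem)
        simp [pvDup, hla, hm, PySem.Set.contains_iff]
    · rw [List.foldl_cons, pvStepA_eq, h3]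
      by_cases h : a ∈ ixps <;> simp [h]

theorem pvPre_some (l : List Int) : ∀ a : Int,
    pvPre (some a) l = ((a :: l).zip l).any (fun p => p.1 == p.2) := by
  induction l with
  | nil => intro a; simp [pvPre]
  | cons b r ih =>
    intro a
    simp only [pvPre, List.zip_cons_cons, List.any_cons, ih b]
    by_cases h : a = b <;> simp [h]

theorem pvPre_none (l : List Int) :
    pvPre none l = (l.zip (l.drop 1)).any (fun p => p.1 == p.2) := by
  cases l with
  | nil => simp [pvPre]
  | cons a r => simp [pvPre, pvPre_some r a]

theorem pvNotMem_of_contains_false (s : PySem.Set Int) (a : Int)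
    (h : PySem.Set.contains s a = false) : a ∉ s := by
  intro hm
  rw [(PySem.Set.contains_iff s a).mpr hm] at h
  exact Bool.noConfusion h

theorem pvAdd_length_of_not_contains (s : PySem.Set Int) (a : Int)
    (h : PySem.Set.contains s a = false) :
    (PySem.Set.add s a).length = s.length + 1 := by
  simp [PySem.Set.add, pvNotMem_of_contains_false s a h]

theorem pvUpdate_length_le (l : List Int) : ∀ s : PySem.Set Int,
    (PySem.Set.update s l).length ≤ s.length + l.length := by
  induction l with
  | nil => intro s; simp [PySem.Set.update]
  | cons a r ih =>
    intro s
    have h1 : (PySem.Set.update (PySem.Set.add s a) r).length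
        ≤ (PySem.Set.add s a).length + r.length := ih (PySem.Set.add s a)
    have hadd : (PySem.Set.add s a).length ≤ s.length + 1 := by
      by_cases h : PySem.Set.contains s a = true
      · have hm : a ∈ s := (PySem.Set.contains_iff s a).mp h
        simp [PySem.Set.add, hm]
      · rw [pvAdd_length_of_not_contains s a (by simpa using h)]
    have hu : PySem.Set.update s (a :: r) = PySem.Set.update (PySem.Set.add s a) r := rfl
    rw [hu]
    simp only [List.length_cons]
    omega

theorem pvDup_card (l : List Int) : ∀ s : PySem.Set Int,
    pvDup s l = !((PySem.Set.update s l).length == s.length + l.length) := by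
  induction l with
  | nil => intro s; simp [pvDup, PySem.Set.update]
  | cons a r ih =>
    intro s
    have hu : PySem.Set.update s (a :: r) = PySem.Set.update (PySem.Set.add s a) r := rfl
    by_cases h : PySem.Set.contains s a = true
    · have hm : a ∈ s := (PySem.Set.contains_iff s a).mp h
      have hadd : PySem.Set.add s a = s := by simp [PySem.Set.add, hm]
      have hle : (PySem.Set.update s r).length ≤ s.length + r.length :=
        pvUpdate_length_le r s
      simp only [pvDup, h, Bool.true_or, hu, hadd, List.length_cons]
      have hne : ((PySem.Set.update s r).length == s.length + (r.length + 1)) = false := by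
        simp; omega
      rw [hne]; rfl
    · have hb : PySem.Set.contains s a = false := by simpa using h
      simp only [pvDup, h, Bool.false_or, hu, ih (PySem.Set.add s a),
        pvAdd_length_of_not_contains s a hb, List.length_cons]
      have harith : s.length + 1 + r.length = s.length + (r.length + 1) := by omega
      rw [harith]

theorem pvUpdate_empty (l : List Int) :
    PySem.Set.update PySem.Set.empty l = PySem.Set.ofList l := by
  rw [PySem.Set.ofList_eq_foldl]; rfl

theorem pvDup_empty_card (l : List Int) :
    pvDup PySem.Set.empty l = !((PySem.Set.ofList l).length == l.length) := by
  rw [pvDup_card, pvUpdate_empty]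
  simp [PySem.Set.empty]

theorem pvAny_isdisjoint (l ixps : List Int) :
    l.any (fun a => decide (a ∈ ixps))
      = !(PySem.Set.isdisjoint (PySem.Set.ofList l) ixps) := by
  cases hd : PySem.Set.isdisjoint (PySem.Set.ofList l) ixps with
  | true =>
    have hdis := (PySem.Set.isdisjoint_iff (PySem.Set.ofList l) ixps).mp hd
    simp only [Bool.not_true, List.any_eq_false, decide_eq_true_eq]
    intro a ha
    exact hdis a ((PySem.Set.mem_ofList l a).mpr ha)
  | false =>
    have hnd : ¬ (PySem.Set.isdisjoint (PySem.Set.ofList l) ixps = true) := by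
      simp [hd]
    rw [PySem.Set.isdisjoint_iff (PySem.Set.ofList l) ixps] at hnd
    push_neg at hnd
    obtain ⟨x, hx, hix⟩ := hnd
    simp only [Bool.not_false, List.any_eq_true, decide_eq_true_eq]
    exact ⟨x, (PySem.Set.mem_ofList l x).mp hx, hix⟩

theorem pvPre_dup : ∀ (l : List Int) (s : PySem.Set Int) (last : Option Int),
    (∀ a, last = some a → PySem.Set.contains s a = true) →
    pvPre last l = true → pvDup s l = true := by
  intro l
  induction l with
  | nil => intro s last _ h; simp [pvPre] at h
  | cons a r ih =>
    intro s last hinv h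
    simp only [pvPre, Bool.or_eq_true, decide_eq_true_eq] at h
    rcases h with h | h
    · have hm : a ∈ s := (PySem.Set.contains_iff s a).mp (hinv a h)
      simp [pvDup, hm]
    · have hinv' : ∀ b, (some a : Option Int) = some b →
          PySem.Set.contains (PySem.Set.add s a) b = true := by
        intro b hb
        cases hb
        simp [PySem.Set.contains_iff, PySem.Set.mem_add]
      simp [pvDup, ih (PySem.Set.add s a) (some a) hinv' h]

-- ===== VERDICT (by name: the statement is the Claim_ definition above) =====
theorem get_path_data_py_spec : Claim_equal_get_path_data_py := by
  intro as_path non_public_asns max_asn ixps _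
  unfold Spec_get_path_data_py get_path_data_py get_path_data_py_alt
  obtain ⟨h1, h2, h3⟩ := pvFold_flags ixps as_path false false false
    PySem.Set.empty none none (by intro a h; cases h)
  have hloop : pvDup PySem.Set.empty as_path
      = (((as_path.zip (as_path.drop 1)).any (fun p => p.1 == p.2))
          || !((PySem.Set.ofList as_path).length == as_path.length)) := by
    cases hz : (as_path.zip (as_path.drop 1)).any (fun p => p.1 == p.2) with
    | false =>
      simp only [Bool.false_or]
      exact pvDup_empty_card as_path
    | true =>
      have hp : pvPre none as_path = true := by rw [pvPre_none]; exact hz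
      have hD := pvPre_dup as_path PySem.Set.empty none (by intro a h; cases h) hp
      simp only [Bool.false_or, hz, Bool.true_or]
      exact hD
  simp only [h1, h2, h3, Bool.false_or, pvPre_none, pvAny_isdisjoint, hloop]
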